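-- pv_equiv track=rewrite | github.com/jflessenkemper/AOE-3-DE-Legendary-Leaders-AI | tools/validation/run_staged_validation.py | normalize_stage_names
-- ===== SOURCE A (Python) =====
-- STAGE_ORDER = ("content", "regression", "packaged", "live", "runtime")
--
-- def normalize_stage_names(requested_stages: list[str]) -> list[str]:
--     if not requested_stages or "all" in requested_stages:
--         return list(STAGE_ORDER)
--
--     normalized: list[str] = []
--     seen: set[str] = set()
--     for stage_name in STAGE_ORDER:
--         if stage_name in requested_stages and stage_name not in seen:
--             normalized.append(stage_name)
--             seen.add(stage_name)
--     return normalized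
-- ===== SOURCE B (Python) =====
-- STAGE_ORDER = ("content", "regression", "packaged", "live", "runtime")
--
-- def normalize_stage_names(requested_stages: list[str]) -> list[str]:
--     if not requested_stages or "all" in requested_stages:
--         return list(STAGE_ORDER)
--     order = {name: i for i, name in enumerate(STAGE_ORDER)}
--     wanted = {s for s in requested_stages if s in order}
--     return sorted(wanted, key=order.get)
-- ===== Notes on version B (the rewrite author's own statement) =====
-- stated objective: idiomatic
-- what changed: Instead of scanning the fixed canonical tuple with a seen-set and testing membership in the request list, B builds a name-to-rank dict from STAGE_ORDER, deduplicates the valid requested names into a set, and returns them sorted by canonical rank.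
import Mathlib
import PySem

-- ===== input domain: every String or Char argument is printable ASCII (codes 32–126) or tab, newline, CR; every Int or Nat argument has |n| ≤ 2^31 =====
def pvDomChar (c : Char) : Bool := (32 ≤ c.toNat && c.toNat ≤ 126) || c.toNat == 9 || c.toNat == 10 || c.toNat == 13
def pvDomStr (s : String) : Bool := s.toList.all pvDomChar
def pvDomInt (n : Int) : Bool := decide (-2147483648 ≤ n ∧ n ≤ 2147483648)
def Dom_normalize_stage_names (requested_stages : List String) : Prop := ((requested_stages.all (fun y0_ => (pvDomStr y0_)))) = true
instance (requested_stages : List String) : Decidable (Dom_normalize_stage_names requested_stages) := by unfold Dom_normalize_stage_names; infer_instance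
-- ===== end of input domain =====

-- B builds a canonical-rank table once and sorts the deduplicated valid requests by rank,
-- instead of scanning the canonical tuple and testing membership — objective: idiomatic.

-- ===== PORT A =====
-- STAGE_ORDER = ("content", "regression", "packaged", "live", "runtime")
def pvStageOrder : List String := ["content", "regression", "packaged", "live", "runtime"]

def normalize_stage_names (requested_stages : List String) : List String :=
  if requested_stages.isEmpty || requested_stages.contains "all" then pvStageOrder
  else
    -- for stage_name in STAGE_ORDER: if stage_name in requested_stages and stage_name not in seen: …
    (pvStageOrder.foldl
      (fun (st : List String × PySem.Set String) stage_name =>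
        if requested_stages.contains stage_name && !(PySem.Set.contains st.2 stage_name) then
          (st.1 ++ [stage_name], PySem.Set.add st.2 stage_name)
        else st)
      ([], PySem.Set.empty)).1

-- ===== PORT B =====
-- order = {name: i for i, name in enumerate(STAGE_ORDER)}
def pvStageRank : PySem.Dict String Int :=
  (PySem.List.enumerate pvStageOrder 0).foldl (fun d p => d.insert p.2 p.1) PySem.Dict.empty

def normalize_stage_names_alt (requested_stages : List String) : List String :=
  if requested_stages.isEmpty || requested_stages.contains "all" then pvStageOrder
  else
    -- wanted = {s for s in requested_stages if s in order}; sorted(wanted, key=order.get)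
    -- (key ported as getD with default 0: every element of wanted is a key of the table, so
    --  Python's order.get never returns None there)
    PySem.List.sorted
      (PySem.Set.ofList (requested_stages.filter (fun s => pvStageRank.contains s)))
      (fun s => pvStageRank.getD s 0)

-- ===== PRECONDITION & SPEC =====
def Spec_normalize_stage_names (requested_stages : List String) (out : List String) : Prop := out = normalize_stage_names_alt requested_stages
instance (requested_stages : List String) (out : List String) : Decidable (Spec_normalize_stage_names requested_stages out) := by unfold Spec_normalize_stage_names; infer_instance

-- ===== CLAIM (what is proved, stated in full; the proofs are below) =====
def Claim_equal_normalize_stage_names : Prop := ∀ (requested_stages : List String), Dom_normalize_stage_names requested_stages → Spec_normalize_stage_names requested_stages (normalize_stage_names requested_stages)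

-- ===== LEMMAS AND PROOFS =====

-- a string is a key of the rank table iff it is a canonical stage name
lemma rank_contains (x : String) :
    (pvStageRank.contains x = true) ↔ x ∈ pvStageOrder := by
  simp [pvStageRank, pvStageOrder, PySem.List.enumerate, PySem.Dict.contains,
    PySem.Dict.insert, PySem.Dict.empty]
  tauto

-- the canonical list is strictly increasing under the rank key
lemma rank_pairwise :
    List.Pairwise (fun a b => pvStageRank.getD a 0 < pvStageRank.getD b 0) pvStageOrder := by
  decide

-- A's loop over the five canonical names is the membership filter (the seen-set never blocks:
-- the five names are distinct)
lemma aElse (req : List String) :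
    (pvStageOrder.foldl
      (fun (st : List String × PySem.Set String) stage_name =>
        if req.contains stage_name && !(PySem.Set.contains st.2 stage_name) then
          (st.1 ++ [stage_name], PySem.Set.add st.2 stage_name)
        else st)
      ([], PySem.Set.empty)).1 = pvStageOrder.filter (fun n => req.contains n) := by
  by_cases h1 : "content" ∈ req <;>
  by_cases h2 : "regression" ∈ req <;>
  by_cases h3 : "packaged" ∈ req <;>
  by_cases h4 : "live" ∈ req <;>
  by_cases h5 : "runtime" ∈ req <;>
  simp [pvStageOrder, h1, h2, h3, h4, h5, PySem.Set.add, PySem.Set.contains, PySem.Set.empty]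

-- B's sorted set is the same membership filter: the filter result is a strictly rank-increasing
-- rearrangement of the deduplicated valid requests
lemma bElse (req : List String) :
    PySem.List.sorted
      (PySem.Set.ofList (req.filter (fun s => pvStageRank.contains s)))
      (fun s => pvStageRank.getD s 0)
    = pvStageOrder.filter (fun n => req.contains n) := by
  apply PySem.List.sorted_eq_of_perm_of_pairwise_lt
  · rw [List.perm_ext_iff_of_nodup ((by decide : pvStageOrder.Nodup).filter _)
      (PySem.Set.nodup_ofList _)]
    intro a
    rw [PySem.Set.mem_ofList]
    simp only [List.mem_filter, ← rank_contains]
    constructor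
    · rintro ⟨ha, hb⟩
      exact ⟨by simpa using hb, ha⟩
    · rintro ⟨ha, hb⟩
      exact ⟨hb, by simpa using ha⟩
  · exact List.Pairwise.sublist (List.filter_sublist) rank_pairwise

-- ===== VERDICT (by name: the statement is the Claim_ definition above) =====
theorem normalize_stage_names_spec : Claim_equal_normalize_stage_names := by
  intro req _
  unfold Spec_normalize_stage_names normalize_stage_names normalize_stage_names_alt
  by_cases hg : (req.isEmpty || req.contains "all") = true
  · rw [if_pos hg, if_pos hg]
  · rw [if_neg hg, if_neg hg, aElse, bElse]
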